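-- pv_equiv track=rewrite | github.com/AaryamanGupta95/Techions | backend/app/api/routes.py | _get_recommended_parts
-- ===== SOURCE A (Python) =====
-- def _get_recommended_parts(predicted_issue: str) -> list:
--     """Get recommended parts based on predicted issue"""
--     if not predicted_issue:
--         return ["Standard maintenance parts"]
--
--     issue_lower = predicted_issue.lower()
--     parts = []
--
--     if any(keyword in issue_lower for keyword in ["engine", "temperature", "overheating"]):
--         parts.extend(["Coolant", "Thermostat", "Radiator cap"])
--     if any(keyword in issue_lower for keyword in ["electrical", "battery"]):
--         parts.extend(["Battery", "Alternator", "Fuses"])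
--     if any(keyword in issue_lower for keyword in ["brake", "braking"]):
--         parts.extend(["Brake pads", "Brake fluid", "Brake rotors"])
--     if any(keyword in issue_lower for keyword in ["suspension"]):
--         parts.extend(["Shock absorbers", "Struts", "Suspension bushings"])
--     if any(keyword in issue_lower for keyword in ["transmission"]):
--         parts.extend(["Transmission fluid", "Transmission filter"])
--     if any(keyword in issue_lower for keyword in ["ac", "air conditioning"]):
--         parts.extend(["Refrigerant", "AC filter", "AC compressor"])
--     if any(keyword in issue_lower for keyword in ["oil", "lubrication"]):
--         parts.extend(["Engine oil", "Oil filter", "Oil pan gasket"])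
--
--     if not parts:
--         parts = ["Standard maintenance parts"]
--
--     return parts[:5]  # Limit to 5 parts
-- ===== SOURCE B (Python) =====
-- _RULES = [
--     (("engine", "temperature", "overheating"), ("Coolant", "Thermostat", "Radiator cap")),
--     (("electrical", "battery"), ("Battery", "Alternator", "Fuses")),
--     (("brake", "braking"), ("Brake pads", "Brake fluid", "Brake rotors")),
--     (("suspension",), ("Shock absorbers", "Struts", "Suspension bushings")),
--     (("transmission",), ("Transmission fluid", "Transmission filter")),
--     (("ac", "air conditioning"), ("Refrigerant", "AC filter", "AC compressor")),
--     (("oil", "lubrication"), ("Engine oil", "Oil filter", "Oil pan gasket")),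
-- ]
--
-- def _collect(issue_lower, rules, need):
--     # Recursively gather matched parts with a remaining budget; stops as soon
--     # as 5 parts have been produced, so no final truncation pass is needed.
--     if need <= 0 or not rules:
--         return []
--     (keywords, rule_parts), rest = rules[0], rules[1:]
--     if any(k in issue_lower for k in keywords):
--         taken = list(rule_parts[:need])
--         return taken + _collect(issue_lower, rest, need - len(taken))
--     return _collect(issue_lower, rest, need)
--
-- def _get_recommended_parts(predicted_issue: str) -> list:
--     if not predicted_issue:
--         return ["Standard maintenance parts"]
--     out = _collect(predicted_issue.lower(), _RULES, 5)
--     return out if out else ["Standard maintenance parts"]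
-- ===== Notes on version B (the rewrite author's own statement) =====
-- stated objective: alternative
-- what changed: Replaces the seven unrolled append-then-slice if-branches by a budgeted recursion over a rule table that emits at most 5 parts directly and stops early once the budget is exhausted, so no trailing [:5] truncation pass exists.
import Mathlib
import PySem

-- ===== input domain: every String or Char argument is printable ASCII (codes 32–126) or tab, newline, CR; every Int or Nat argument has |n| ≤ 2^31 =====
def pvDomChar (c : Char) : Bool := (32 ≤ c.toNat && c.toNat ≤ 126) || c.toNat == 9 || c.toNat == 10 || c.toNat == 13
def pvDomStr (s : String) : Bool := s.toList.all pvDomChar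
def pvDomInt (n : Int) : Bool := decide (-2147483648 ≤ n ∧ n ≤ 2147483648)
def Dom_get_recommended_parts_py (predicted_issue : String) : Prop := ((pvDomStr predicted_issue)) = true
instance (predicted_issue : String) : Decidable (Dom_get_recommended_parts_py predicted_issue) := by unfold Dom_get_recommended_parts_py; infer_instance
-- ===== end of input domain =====

-- B replaces A's seven unrolled append-then-slice branches by a budgeted recursion over a rule table that emits at most 5 parts and stops early (objective: alternative).


-- ===== PORT A =====
def get_recommended_parts_py (predicted_issue : String) : List String :=
  if predicted_issue = "" then ["Standard maintenance parts"]
  else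
    let issue_lower := PySem.Str.lower predicted_issue
    let parts : List String := []
    let parts := if ["engine", "temperature", "overheating"].any (fun kw => PySem.Str.isIn kw issue_lower) then parts ++ ["Coolant", "Thermostat", "Radiator cap"] else parts
    let parts := if ["electrical", "battery"].any (fun kw => PySem.Str.isIn kw issue_lower) then parts ++ ["Battery", "Alternator", "Fuses"] else parts
    let parts := if ["brake", "braking"].any (fun kw => PySem.Str.isIn kw issue_lower) then parts ++ ["Brake pads", "Brake fluid", "Brake rotors"] else parts
    let parts := if ["suspension"].any (fun kw => PySem.Str.isIn kw issue_lower) then parts ++ ["Shock absorbers", "Struts", "Suspension bushings"] else parts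
    let parts := if ["transmission"].any (fun kw => PySem.Str.isIn kw issue_lower) then parts ++ ["Transmission fluid", "Transmission filter"] else parts
    let parts := if ["ac", "air conditioning"].any (fun kw => PySem.Str.isIn kw issue_lower) then parts ++ ["Refrigerant", "AC filter", "AC compressor"] else parts
    let parts := if ["oil", "lubrication"].any (fun kw => PySem.Str.isIn kw issue_lower) then parts ++ ["Engine oil", "Oil filter", "Oil pan gasket"] else parts
    let parts := if parts = [] then ["Standard maintenance parts"] else parts
    PySem.List.slice parts none (some 5)

-- ===== PORT B =====
-- rule table (B's _RULES)
def pvRules : List (List String × List String) :=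
  [ (["engine", "temperature", "overheating"], ["Coolant", "Thermostat", "Radiator cap"]),
    (["electrical", "battery"], ["Battery", "Alternator", "Fuses"]),
    (["brake", "braking"], ["Brake pads", "Brake fluid", "Brake rotors"]),
    (["suspension"], ["Shock absorbers", "Struts", "Suspension bushings"]),
    (["transmission"], ["Transmission fluid", "Transmission filter"]),
    (["ac", "air conditioning"], ["Refrigerant", "AC filter", "AC compressor"]),
    (["oil", "lubrication"], ["Engine oil", "Oil filter", "Oil pan gasket"]) ]

-- B's _collect: budgeted recursion, stops once the budget (5) is exhausted
def pvCollect (issue_lower : String) (rules : List (List String × List String)) (need : Nat) : List String :=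
  match need, rules with
  | 0, _ => []
  | _, [] => []
  | Nat.succ m, (keywords, rule_parts) :: rest =>
    if keywords.any (fun k => PySem.Str.isIn k issue_lower) then
      let taken := rule_parts.take (Nat.succ m)
      taken ++ pvCollect issue_lower rest (Nat.succ m - taken.length)
    else pvCollect issue_lower rest (Nat.succ m)

def get_recommended_parts_py_alt (predicted_issue : String) : List String :=
  if predicted_issue = "" then ["Standard maintenance parts"]
  else
    let out := pvCollect (PySem.Str.lower predicted_issue) pvRules 5
    if out = [] then ["Standard maintenance parts"] else out

-- ===== PRECONDITION & SPEC =====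
def Spec_get_recommended_parts_py (predicted_issue : String) (out : List String) : Prop := out = get_recommended_parts_py_alt predicted_issue
instance (predicted_issue : String) (out : List String) : Decidable (Spec_get_recommended_parts_py predicted_issue out) := by unfold Spec_get_recommended_parts_py; infer_instance

-- ===== CLAIM =====
def Claim_equal_get_recommended_parts_py : Prop := ∀ (predicted_issue : String), Dom_get_recommended_parts_py predicted_issue → Spec_get_recommended_parts_py predicted_issue (get_recommended_parts_py predicted_issue)

-- ===== LEMMAS AND PROOFS =====
-- concatenation of the parts of all matched rules (characterises A's if-chain)
def matchedConcat (issue : String) : List (List String × List String) → List String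
  | [] => []
  | (keywords, rule_parts) :: rest =>
    (if keywords.any (fun kw => PySem.Str.isIn kw issue) then rule_parts else []) ++ matchedConcat issue rest

-- B's budgeted recursion computes the truncated matched concatenation
theorem collect_eq (issue : String) : ∀ (rules : List (List String × List String)) (need : Nat),
    pvCollect issue rules need = (matchedConcat issue rules).take need := by
  intro rules
  induction rules with
  | nil => intro need; cases need <;> rfl
  | cons r rest ih =>
    rcases r with ⟨kws, ps⟩
    intro need
    cases need with
    | zero => rfl
    | succ m =>
      simp only [pvCollect, matchedConcat]
      split_ifs with hc
      · rw [ih, List.take_append, List.length_take]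
        have : Nat.succ m - min (Nat.succ m) ps.length = Nat.succ m - ps.length := by omega
        rw [this]
      · rw [ih]; simp

-- ===== VERDICT =====
theorem get_recommended_parts_py_spec : Claim_equal_get_recommended_parts_py := by
  intro s _
  unfold Spec_get_recommended_parts_py
  by_cases h : s = ""
  · subst h; rfl
  · unfold get_recommended_parts_py get_recommended_parts_py_alt pvRules
    rw [if_neg h, if_neg h]
    rw [collect_eq]
    simp only [matchedConcat]
    generalize (List.any ["engine", "temperature", "overheating"] fun kw => PySem.Str.isIn kw (PySem.Str.lower s)) = b1
    generalize (List.any ["electrical", "battery"] fun kw => PySem.Str.isIn kw (PySem.Str.lower s)) = b2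
    generalize (List.any ["brake", "braking"] fun kw => PySem.Str.isIn kw (PySem.Str.lower s)) = b3
    generalize (List.any ["suspension"] fun kw => PySem.Str.isIn kw (PySem.Str.lower s)) = b4
    generalize (List.any ["transmission"] fun kw => PySem.Str.isIn kw (PySem.Str.lower s)) = b5
    generalize (List.any ["ac", "air conditioning"] fun kw => PySem.Str.isIn kw (PySem.Str.lower s)) = b6
    generalize (List.any ["oil", "lubrication"] fun kw => PySem.Str.isIn kw (PySem.Str.lower s)) = b7
    revert b1 b2 b3 b4 b5 b6 b7
    decide
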